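-- pv_equiv track=rewrite | github.com/jonathonreilly/toy-physics | scripts/frontier_s3_cap_link_formal.py | cubical_vertex_link
-- ===== SOURCE A (Python) =====
-- def cubical_vertex_link(v: tuple[int,int,int],
--                         sites_set: set) -> tuple[list, list[tuple], list[tuple]]:
--     """
--     Compute the link of vertex v in the cubical complex.
--
--     Returns (link_verts_as_dirs, link_edges, link_triangles).
--     link_verts_as_dirs[i] is the direction from v to the i-th link vertex.
--     link_edges are pairs (i,j) of indices.
--     link_triangles are triples (i,j,k) of indices.
--     """
--     x, y, z = v
--     axis_dirs = [(1,0,0),(-1,0,0),(0,1,0),(0,-1,0),(0,0,1),(0,0,-1)]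
--
--     link_verts = []
--     for d in axis_dirs:
--         nb = (x+d[0], y+d[1], z+d[2])
--         if nb in sites_set:
--             link_verts.append(d)
--
--     link_edges = []
--     for i, d1 in enumerate(link_verts):
--         for j, d2 in enumerate(link_verts):
--             if j <= i:
--                 continue
--             # Must be along different axes (dot product = 0)
--             if d1[0]*d2[0] + d1[1]*d2[1] + d1[2]*d2[2] != 0:
--                 continue
--             corner = (x+d1[0]+d2[0], y+d1[1]+d2[1], z+d1[2]+d2[2])
--             if corner in sites_set:
--                 link_edges.append((i, j))
--
--     link_triangles = []
--     for i, d1 in enumerate(link_verts):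
--         for j, d2 in enumerate(link_verts):
--             if j <= i:
--                 continue
--             for k, d3 in enumerate(link_verts):
--                 if k <= j:
--                     continue
--                 dots = [d1[0]*d2[0]+d1[1]*d2[1]+d1[2]*d2[2],
--                         d1[0]*d3[0]+d1[1]*d3[1]+d1[2]*d3[2],
--                         d2[0]*d3[0]+d2[1]*d3[1]+d2[2]*d3[2]]
--                 if any(dot != 0 for dot in dots):
--                     continue
--                 pts = [
--                     (x+d1[0], y+d1[1], z+d1[2]),
--                     (x+d2[0], y+d2[1], z+d2[2]),
--                     (x+d3[0], y+d3[1], z+d3[2]),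
--                     (x+d1[0]+d2[0], y+d1[1]+d2[1], z+d1[2]+d2[2]),
--                     (x+d1[0]+d3[0], y+d1[1]+d3[1], z+d1[2]+d3[2]),
--                     (x+d2[0]+d3[0], y+d2[1]+d3[1], z+d2[2]+d3[2]),
--                     (x+d1[0]+d2[0]+d3[0], y+d1[1]+d2[1]+d3[1], z+d1[2]+d2[2]+d3[2]),
--                 ]
--                 if all(p in sites_set for p in pts):
--                     link_triangles.append((i, j, k))
--
--     return link_verts, link_edges, link_triangles
-- ===== SOURCE B (Python) =====
-- def cubical_vertex_link(v: tuple[int,int,int],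
--                         sites_set: set) -> tuple[list, list[tuple], list[tuple]]:
--     """Link of vertex v: derive the triangles from the edge set (three edges +
--     one cube corner) instead of recomputing all the geometry per triple."""
--     x, y, z = v
--     axis_dirs = [(1,0,0),(-1,0,0),(0,1,0),(0,-1,0),(0,0,1),(0,0,-1)]
--
--     link_verts = [d for d in axis_dirs if (x+d[0], y+d[1], z+d[2]) in sites_set]
--     n = len(link_verts)
--
--     link_edges = [(i, j)
--                   for i in range(n)
--                   for j in range(i+1, n)
--                   if link_verts[i][0]*link_verts[j][0]
--                      + link_verts[i][1]*link_verts[j][1]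
--                      + link_verts[i][2]*link_verts[j][2] == 0
--                   and (x+link_verts[i][0]+link_verts[j][0],
--                        y+link_verts[i][1]+link_verts[j][1],
--                        z+link_verts[i][2]+link_verts[j][2]) in sites_set]
--
--     edge_set = set(link_edges)
--     link_triangles = [(i, j, k)
--                       for (i, j) in link_edges
--                       for k in range(j+1, n)
--                       if (i, k) in edge_set and (j, k) in edge_set
--                       and (x+link_verts[i][0]+link_verts[j][0]+link_verts[k][0],
--                            y+link_verts[i][1]+link_verts[j][1]+link_verts[k][1],
--                            z+link_verts[i][2]+link_verts[j][2]+link_verts[k][2]) in sites_set]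
--
--     return link_verts, link_edges, link_triangles
-- ===== Notes on version B (the rewrite author's own statement) =====
-- stated objective: alternative
-- what changed: B builds the edge list once (comprehension over index ranges), indexes it as a set, and derives each triangle from its three edges plus a single cube-corner membership test, instead of A's triple nested loop that rechecks all three orthogonality dot products and all seven cube points per candidate triple.
import Mathlib
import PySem

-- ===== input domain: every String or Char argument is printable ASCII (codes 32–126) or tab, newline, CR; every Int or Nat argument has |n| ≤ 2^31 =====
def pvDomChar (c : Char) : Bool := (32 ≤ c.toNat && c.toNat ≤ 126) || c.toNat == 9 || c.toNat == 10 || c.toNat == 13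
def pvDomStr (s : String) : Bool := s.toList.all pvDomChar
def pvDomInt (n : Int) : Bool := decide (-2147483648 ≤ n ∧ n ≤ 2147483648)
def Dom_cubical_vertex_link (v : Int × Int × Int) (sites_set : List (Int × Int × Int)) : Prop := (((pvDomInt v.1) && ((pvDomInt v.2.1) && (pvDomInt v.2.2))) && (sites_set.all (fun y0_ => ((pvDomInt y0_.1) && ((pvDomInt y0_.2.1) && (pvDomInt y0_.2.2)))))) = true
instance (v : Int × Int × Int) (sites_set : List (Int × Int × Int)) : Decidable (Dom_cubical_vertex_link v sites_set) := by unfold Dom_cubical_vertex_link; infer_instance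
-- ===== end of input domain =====

-- B derives each link triangle from its three link edges (kept in a set) plus one
-- cube-corner membership test, instead of A's triple loop re-checking all three dot
-- products and all seven cube points; objective: alternative decomposition, same cost class.

-- ===== PORT A =====
-- axis_dirs (shared module-level constant of both programs)
def pvAxisDirs : List (Int × Int × Int) :=
  [(1,0,0),(-1,0,0),(0,1,0),(0,-1,0),(0,0,1),(0,0,-1)]

-- 'for d in axis_dirs: if nb in sites_set: link_verts.append(d)'
def pvVertsA (x y z : Int) (S : List (Int × Int × Int)) : List (Int × Int × Int) :=
  pvAxisDirs.foldl (fun acc d =>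
    if S.contains (x + d.1, y + d.2.1, z + d.2.2) then acc ++ [d] else acc) []

-- the double loop over enumerate(link_verts) building link_edges
def pvEdgesA (x y z : Int) (S : List (Int × Int × Int)) (L : List (Int × Int × Int)) :
    List (Int × Int) :=
  (PySem.List.enumerate L).foldl (fun acc p =>
    (PySem.List.enumerate L).foldl (fun acc2 q =>
      if q.1 ≤ p.1 then acc2
      else if p.2.1 * q.2.1 + p.2.2.1 * q.2.2.1 + p.2.2.2 * q.2.2.2 ≠ 0 then acc2
      else if S.contains (x + p.2.1 + q.2.1, y + p.2.2.1 + q.2.2.1, z + p.2.2.2 + q.2.2.2)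
        then acc2 ++ [(p.1, q.1)] else acc2) acc) []

-- the triple loop over enumerate(link_verts) building link_triangles
def pvTrisA (x y z : Int) (S : List (Int × Int × Int)) (L : List (Int × Int × Int)) :
    List (Int × Int × Int) :=
  (PySem.List.enumerate L).foldl (fun acc p =>
    (PySem.List.enumerate L).foldl (fun acc2 q =>
      if q.1 ≤ p.1 then acc2
      else (PySem.List.enumerate L).foldl (fun acc3 r =>
        if r.1 ≤ q.1 then acc3
        else if p.2.1 * q.2.1 + p.2.2.1 * q.2.2.1 + p.2.2.2 * q.2.2.2 ≠ 0 ∨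
                p.2.1 * r.2.1 + p.2.2.1 * r.2.2.1 + p.2.2.2 * r.2.2.2 ≠ 0 ∨
                q.2.1 * r.2.1 + q.2.2.1 * r.2.2.1 + q.2.2.2 * r.2.2.2 ≠ 0 then acc3
        else if S.contains (x + p.2.1, y + p.2.2.1, z + p.2.2.2) &&
                S.contains (x + q.2.1, y + q.2.2.1, z + q.2.2.2) &&
                S.contains (x + r.2.1, y + r.2.2.1, z + r.2.2.2) &&
                S.contains (x + p.2.1 + q.2.1, y + p.2.2.1 + q.2.2.1, z + p.2.2.2 + q.2.2.2) &&
                S.contains (x + p.2.1 + r.2.1, y + p.2.2.1 + r.2.2.1, z + p.2.2.2 + r.2.2.2) &&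
                S.contains (x + q.2.1 + r.2.1, y + q.2.2.1 + r.2.2.1, z + q.2.2.2 + r.2.2.2) &&
                S.contains (x + p.2.1 + q.2.1 + r.2.1, y + p.2.2.1 + q.2.2.1 + r.2.2.1,
                            z + p.2.2.2 + q.2.2.2 + r.2.2.2)
          then acc3 ++ [(p.1, q.1, r.1)] else acc3) acc2) acc) []

def cubical_vertex_link (v : Int × Int × Int) (sites_set : List (Int × Int × Int)) :
    (List (Int × Int × Int)) × (List (Int × Int)) × (List (Int × Int × Int)) :=
  let x := v.1; let y := v.2.1; let z := v.2.2
  let link_verts := pvVertsA x y z sites_set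
  (link_verts, pvEdgesA x y z sites_set link_verts, pvTrisA x y z sites_set link_verts)

-- ===== PORT B =====
-- '[d for d in axis_dirs if (x+d[0], y+d[1], z+d[2]) in sites_set]'
def pvVertsB (x y z : Int) (S : List (Int × Int × Int)) : List (Int × Int × Int) :=
  pvAxisDirs.filter (fun d => S.contains (x + d.1, y + d.2.1, z + d.2.2))

-- the link_edges comprehension over i in range(n), j in range(i+1, n)
def pvEdgesB (x y z : Int) (S : List (Int × Int × Int)) (L : List (Int × Int × Int)) :
    List (Int × Int) :=
  (PySem.List.pyRange 0 (PySem.List.len L) 1).flatMap (fun i =>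
    ((PySem.List.pyRange (i + 1) (PySem.List.len L) 1).filter (fun j =>
        ((PySem.List.pyGetD L i (0,0,0)).1 * (PySem.List.pyGetD L j (0,0,0)).1 +
         (PySem.List.pyGetD L i (0,0,0)).2.1 * (PySem.List.pyGetD L j (0,0,0)).2.1 +
         (PySem.List.pyGetD L i (0,0,0)).2.2 * (PySem.List.pyGetD L j (0,0,0)).2.2 == 0) &&
        S.contains (x + (PySem.List.pyGetD L i (0,0,0)).1 + (PySem.List.pyGetD L j (0,0,0)).1,
                    y + (PySem.List.pyGetD L i (0,0,0)).2.1 + (PySem.List.pyGetD L j (0,0,0)).2.1,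
                    z + (PySem.List.pyGetD L i (0,0,0)).2.2 + (PySem.List.pyGetD L j (0,0,0)).2.2))).map
      (fun j => (i, j)))

-- the link_triangles comprehension over (i,j) in link_edges, k in range(j+1, n)
def pvTrisB (x y z : Int) (S : List (Int × Int × Int)) (L : List (Int × Int × Int))
    (edges : List (Int × Int)) : List (Int × Int × Int) :=
  let edge_set : PySem.Set (Int × Int) := PySem.Set.ofList edges
  edges.flatMap (fun e =>
    ((PySem.List.pyRange (e.2 + 1) (PySem.List.len L) 1).filter (fun k =>
        PySem.Set.contains edge_set (e.1, k) && PySem.Set.contains edge_set (e.2, k) &&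
        S.contains (x + (PySem.List.pyGetD L e.1 (0,0,0)).1 + (PySem.List.pyGetD L e.2 (0,0,0)).1 +
                        (PySem.List.pyGetD L k (0,0,0)).1,
                    y + (PySem.List.pyGetD L e.1 (0,0,0)).2.1 + (PySem.List.pyGetD L e.2 (0,0,0)).2.1 +
                        (PySem.List.pyGetD L k (0,0,0)).2.1,
                    z + (PySem.List.pyGetD L e.1 (0,0,0)).2.2 + (PySem.List.pyGetD L e.2 (0,0,0)).2.2 +
                        (PySem.List.pyGetD L k (0,0,0)).2.2))).map
      (fun k => (e.1, e.2, k)))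

def cubical_vertex_link_alt (v : Int × Int × Int) (sites_set : List (Int × Int × Int)) :
    (List (Int × Int × Int)) × (List (Int × Int)) × (List (Int × Int × Int)) :=
  let x := v.1; let y := v.2.1; let z := v.2.2
  let link_verts := pvVertsB x y z sites_set
  let link_edges := pvEdgesB x y z sites_set link_verts
  (link_verts, link_edges, pvTrisB x y z sites_set link_verts link_edges)

-- ===== PRECONDITION & SPEC =====
def Spec_cubical_vertex_link (v : Int × Int × Int) (sites_set : List (Int × Int × Int)) (out : (List (Int × Int × Int)) × (List (Int × Int)) × (List (Int × Int × Int))) : Prop := out = cubical_vertex_link_alt v sites_set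
instance (v : Int × Int × Int) (sites_set : List (Int × Int × Int)) (out : (List (Int × Int × Int)) × (List (Int × Int)) × (List (Int × Int × Int))) : Decidable (Spec_cubical_vertex_link v sites_set out) := by unfold Spec_cubical_vertex_link; infer_instance

-- ===== CLAIM (what is proved, stated in full; the proofs are below) =====
def Claim_equal_cubical_vertex_link : Prop := ∀ (v : Int × Int × Int) (sites_set : List (Int × Int × Int)), Dom_cubical_vertex_link v sites_set → Spec_cubical_vertex_link v sites_set (cubical_vertex_link v sites_set)



-- ===== LEMMAS AND PROOFS =====

-- abbreviation used only by the proofs: the edge condition of B, as a function of two directions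
def pvEC (x y z : Int) (S : List (Int × Int × Int)) (a b : Int × Int × Int) : Bool :=
  (a.1 * b.1 + a.2.1 * b.2.1 + a.2.2 * b.2.2 == 0) &&
  S.contains (x + a.1 + b.1, y + a.2.1 + b.2.1, z + a.2.2 + b.2.2)

-- the full triangle condition of A, as a function of three directions
def pvTC (x y z : Int) (S : List (Int × Int × Int)) (a b c : Int × Int × Int) : Bool :=
  (a.1 * b.1 + a.2.1 * b.2.1 + a.2.2 * b.2.2 == 0) &&
  (a.1 * c.1 + a.2.1 * c.2.1 + a.2.2 * c.2.2 == 0) &&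
  (b.1 * c.1 + b.2.1 * c.2.1 + b.2.2 * c.2.2 == 0) &&
  S.contains (x + a.1, y + a.2.1, z + a.2.2) &&
  S.contains (x + b.1, y + b.2.1, z + b.2.2) &&
  S.contains (x + c.1, y + c.2.1, z + c.2.2) &&
  S.contains (x + a.1 + b.1, y + a.2.1 + b.2.1, z + a.2.2 + b.2.2) &&
  S.contains (x + a.1 + c.1, y + a.2.1 + c.2.1, z + a.2.2 + c.2.2) &&
  S.contains (x + b.1 + c.1, y + b.2.1 + c.2.1, z + b.2.2 + c.2.2) &&
  S.contains (x + a.1 + b.1 + c.1, y + a.2.1 + b.2.1 + c.2.1, z + a.2.2 + b.2.2 + c.2.2)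

theorem pv_flatMap_filter {a b : Type} (l : List a) (p : a -> Bool) (f : a -> List b)
    (h : forall x, x ∈ l -> p x = false -> f x = []) : l.flatMap f = (l.filter p).flatMap f := by
  induction l with
  | nil => rfl
  | cons hd t ih =>
    rw [List.flatMap_cons, List.filter_cons]
    by_cases hp : p hd = true
    · rw [if_pos hp, List.flatMap_cons, ih (fun x hx => h x (List.mem_cons_of_mem _ hx))]
    · rw [if_neg hp, h hd (List.mem_cons_self ..) (by simpa using hp), List.nil_append,
        ih (fun x hx => h x (List.mem_cons_of_mem _ hx))]

theorem pv_filter_range (i n : Int) (hi : 0 ≤ i) (hn : i < n) (c : Int -> Bool) :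
    (PySem.List.pyRange 0 n 1).filter (fun j => decide (i < j) && c j)
      = (PySem.List.pyRange (i + 1) n 1).filter c := by
  rw [PySem.List.pyRange_one_append 0 (i + 1) n (by omega) (by omega), List.filter_append]
  have h1 : (PySem.List.pyRange 0 (i + 1) 1).filter (fun j => decide (i < j) && c j) = [] := by
    rw [List.filter_eq_nil_iff]
    intro a ha
    have hm := (PySem.List.mem_pyRange_one).mp ha
    simp only [Bool.and_eq_true, decide_eq_true_eq, not_and]
    intro h; omega
  rw [h1, List.nil_append]
  refine List.filter_congr (fun a ha => ?_)
  have hm := (PySem.List.mem_pyRange_one).mp ha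
  rw [decide_eq_true (show i < a by omega), Bool.true_and]

theorem pv_flatMap_range {b : Type} (i n : Int) (hi : 0 ≤ i) (hn : i < n) (g : Int -> List b) :
    (PySem.List.pyRange 0 n 1).flatMap (fun j => if j ≤ i then [] else g j)
      = (PySem.List.pyRange (i + 1) n 1).flatMap g := by
  rw [PySem.List.pyRange_one_append 0 (i + 1) n (by omega) (by omega), List.flatMap_append]
  have h1 : (PySem.List.pyRange 0 (i + 1) 1).flatMap (fun j => if j ≤ i then [] else g j) = [] := by
    rw [List.flatMap_eq_nil_iff]
    intro a ha
    have hm := (PySem.List.mem_pyRange_one).mp ha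
    rw [if_pos (by omega)]
  rw [h1, List.nil_append]
  refine List.flatMap_congr (fun a ha => ?_)
  have hm := (PySem.List.mem_pyRange_one).mp ha
  rw [if_neg (by omega)]

-- A's vertex loop is B's filter
theorem pv_verts_eq (x y z : Int) (S : List (Int × Int × Int)) :
    pvVertsA x y z S = pvVertsB x y z S := by
  unfold pvVertsA pvVertsB
  rw [PySem.List.foldl_append_if_eq_filter, List.nil_append]

-- A's edge double loop, in canonical flatMap/filter form over index ranges
set_option maxHeartbeats 1000000 in
theorem pvEdgesA_canon (x y z : Int) (S L : List (Int × Int × Int)) :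
    pvEdgesA x y z S L =
      (PySem.List.pyRange 0 (PySem.List.len L) 1).flatMap (fun i =>
        ((PySem.List.pyRange (i + 1) (PySem.List.len L) 1).filter (fun j =>
            pvEC x y z S (PySem.List.pyGetD L i (0,0,0)) (PySem.List.pyGetD L j (0,0,0)))).map
          (fun j => (i, j))) := by
  unfold pvEdgesA
  have hin : forall (p : Int × (Int × Int × Int)) (acc : List (Int × Int)),
      (PySem.List.enumerate L).foldl (fun acc2 q =>
        if q.1 ≤ p.1 then acc2
        else if p.2.1 * q.2.1 + p.2.2.1 * q.2.2.1 + p.2.2.2 * q.2.2.2 ≠ 0 then acc2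
        else if S.contains (x + p.2.1 + q.2.1, y + p.2.2.1 + q.2.2.1, z + p.2.2.2 + q.2.2.2)
          then acc2 ++ [(p.1, q.1)] else acc2) acc
      = acc ++ ((PySem.List.enumerate L).filter (fun q =>
            decide (p.1 < q.1) && pvEC x y z S p.2 q.2)).map (fun q => (p.1, q.1)) := by
    intro p acc
    have hbody : forall (acc2 : List (Int × Int)) (q : Int × (Int × Int × Int)),
        q ∈ PySem.List.enumerate L ->
        (if q.1 ≤ p.1 then acc2
         else if p.2.1 * q.2.1 + p.2.2.1 * q.2.2.1 + p.2.2.2 * q.2.2.2 ≠ 0 then acc2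
         else if S.contains (x + p.2.1 + q.2.1, y + p.2.2.1 + q.2.2.1, z + p.2.2.2 + q.2.2.2)
           then acc2 ++ [(p.1, q.1)] else acc2)
        = if (decide (p.1 < q.1) && pvEC x y z S p.2 q.2) = true
            then acc2 ++ [(p.1, q.1)] else acc2 := by
      intro acc2 q _
      by_cases h1 : q.1 ≤ p.1
      · simp [h1, show ¬ p.1 < q.1 by omega]
      · by_cases h2 : p.2.1 * q.2.1 + p.2.2.1 * q.2.2.1 + p.2.2.2 * q.2.2.2 = 0
        · by_cases h3 : S.contains (x + p.2.1 + q.2.1, y + p.2.2.1 + q.2.2.1, z + p.2.2.2 + q.2.2.2) = true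
          · simp_all [pvEC, show p.1 < q.1 by omega]
          · simp_all [pvEC]
        · simp [h1, h2, pvEC]
    exact (PySem.List.foldl_congr_mem _ _ _ _ hbody).trans (PySem.List.foldl_append_if ..)
  refine Eq.trans ((PySem.List.foldl_congr_mem _ _ _ _ (fun acc p _ => hin p acc)).trans
    (PySem.List.foldl_append_eq_flatMap ..)) ?_
  rw [List.nil_append,
    PySem.List.enumerate_eq_map_pyRange L ((0:Int),(0:Int),(0:Int)), List.flatMap_map]
  refine List.flatMap_congr (fun i hi => ?_)
  have hm := (PySem.List.mem_pyRange_one).mp hi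
  simp only [List.filter_map, List.map_map, Function.comp_def]
  rw [pv_filter_range i (PySem.List.len L) (by omega) (by omega)]

-- B's edges = A's edges
theorem pv_edges_eq (x y z : Int) (S L : List (Int × Int × Int)) :
    pvEdgesA x y z S L = pvEdgesB x y z S L := by
  rw [pvEdgesA_canon]
  unfold pvEdgesB
  simp only [pvEC]

-- A's triangle triple loop, in canonical form
set_option maxHeartbeats 1000000 in
theorem pvTrisA_canon (x y z : Int) (S L : List (Int × Int × Int)) :
    pvTrisA x y z S L =
      (PySem.List.pyRange 0 (PySem.List.len L) 1).flatMap (fun i =>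
        (PySem.List.pyRange (i + 1) (PySem.List.len L) 1).flatMap (fun j =>
          ((PySem.List.pyRange (j + 1) (PySem.List.len L) 1).filter (fun k =>
              pvTC x y z S (PySem.List.pyGetD L i (0,0,0)) (PySem.List.pyGetD L j (0,0,0))
                (PySem.List.pyGetD L k (0,0,0)))).map (fun k => (i, j, k)))) := by
  unfold pvTrisA
  have hin3 : forall (p q : Int × (Int × Int × Int)) (acc : List (Int × Int × Int)),
      (PySem.List.enumerate L).foldl (fun acc3 r =>
        if r.1 ≤ q.1 then acc3
        else if p.2.1 * q.2.1 + p.2.2.1 * q.2.2.1 + p.2.2.2 * q.2.2.2 ≠ 0 ∨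
                p.2.1 * r.2.1 + p.2.2.1 * r.2.2.1 + p.2.2.2 * r.2.2.2 ≠ 0 ∨
                q.2.1 * r.2.1 + q.2.2.1 * r.2.2.1 + q.2.2.2 * r.2.2.2 ≠ 0 then acc3
        else if S.contains (x + p.2.1, y + p.2.2.1, z + p.2.2.2) &&
                S.contains (x + q.2.1, y + q.2.2.1, z + q.2.2.2) &&
                S.contains (x + r.2.1, y + r.2.2.1, z + r.2.2.2) &&
                S.contains (x + p.2.1 + q.2.1, y + p.2.2.1 + q.2.2.1, z + p.2.2.2 + q.2.2.2) &&
                S.contains (x + p.2.1 + r.2.1, y + p.2.2.1 + r.2.2.1, z + p.2.2.2 + r.2.2.2) &&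
                S.contains (x + q.2.1 + r.2.1, y + q.2.2.1 + r.2.2.1, z + q.2.2.2 + r.2.2.2) &&
                S.contains (x + p.2.1 + q.2.1 + r.2.1, y + p.2.2.1 + q.2.2.1 + r.2.2.1,
                            z + p.2.2.2 + q.2.2.2 + r.2.2.2)
          then acc3 ++ [(p.1, q.1, r.1)] else acc3) acc
      = acc ++ ((PySem.List.enumerate L).filter (fun r =>
            decide (q.1 < r.1) && pvTC x y z S p.2 q.2 r.2)).map (fun r => (p.1, q.1, r.1)) := by
    intro p q acc
    have hbody : forall (acc3 : List (Int × Int × Int)) (r : Int × (Int × Int × Int)),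
        r ∈ PySem.List.enumerate L ->
        (if r.1 ≤ q.1 then acc3
         else if p.2.1 * q.2.1 + p.2.2.1 * q.2.2.1 + p.2.2.2 * q.2.2.2 ≠ 0 ∨
                 p.2.1 * r.2.1 + p.2.2.1 * r.2.2.1 + p.2.2.2 * r.2.2.2 ≠ 0 ∨
                 q.2.1 * r.2.1 + q.2.2.1 * r.2.2.1 + q.2.2.2 * r.2.2.2 ≠ 0 then acc3
         else if S.contains (x + p.2.1, y + p.2.2.1, z + p.2.2.2) &&
                 S.contains (x + q.2.1, y + q.2.2.1, z + q.2.2.2) &&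
                 S.contains (x + r.2.1, y + r.2.2.1, z + r.2.2.2) &&
                 S.contains (x + p.2.1 + q.2.1, y + p.2.2.1 + q.2.2.1, z + p.2.2.2 + q.2.2.2) &&
                 S.contains (x + p.2.1 + r.2.1, y + p.2.2.1 + r.2.2.1, z + p.2.2.2 + r.2.2.2) &&
                 S.contains (x + q.2.1 + r.2.1, y + q.2.2.1 + r.2.2.1, z + q.2.2.2 + r.2.2.2) &&
                 S.contains (x + p.2.1 + q.2.1 + r.2.1, y + p.2.2.1 + q.2.2.1 + r.2.2.1,
                             z + p.2.2.2 + q.2.2.2 + r.2.2.2)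
           then acc3 ++ [(p.1, q.1, r.1)] else acc3)
        = if (decide (q.1 < r.1) && pvTC x y z S p.2 q.2 r.2) = true
            then acc3 ++ [(p.1, q.1, r.1)] else acc3 := by
      intro acc3 r _
      by_cases h1 : r.1 ≤ q.1
      · simp [h1, show ¬ q.1 < r.1 by omega]
      · by_cases h2a : p.2.1 * q.2.1 + p.2.2.1 * q.2.2.1 + p.2.2.2 * q.2.2.2 = 0
        · by_cases h2b : p.2.1 * r.2.1 + p.2.2.1 * r.2.2.1 + p.2.2.2 * r.2.2.2 = 0
          · by_cases h2c : q.2.1 * r.2.1 + q.2.2.1 * r.2.2.1 + q.2.2.2 * r.2.2.2 = 0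
            · by_cases h3 : (S.contains (x + p.2.1, y + p.2.2.1, z + p.2.2.2) &&
                  S.contains (x + q.2.1, y + q.2.2.1, z + q.2.2.2) &&
                  S.contains (x + r.2.1, y + r.2.2.1, z + r.2.2.2) &&
                  S.contains (x + p.2.1 + q.2.1, y + p.2.2.1 + q.2.2.1, z + p.2.2.2 + q.2.2.2) &&
                  S.contains (x + p.2.1 + r.2.1, y + p.2.2.1 + r.2.2.1, z + p.2.2.2 + r.2.2.2) &&
                  S.contains (x + q.2.1 + r.2.1, y + q.2.2.1 + r.2.2.1, z + q.2.2.2 + r.2.2.2) &&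
                  S.contains (x + p.2.1 + q.2.1 + r.2.1, y + p.2.2.1 + q.2.2.1 + r.2.2.1,
                              z + p.2.2.2 + q.2.2.2 + r.2.2.2)) = true
              · simp only [Bool.and_eq_true] at h3
                obtain ⟨⟨⟨⟨⟨⟨hv1, hv2⟩, hv3⟩, hc12⟩, hc13⟩, hc23⟩, hc123⟩ := h3
                simp_all [pvTC, show q.1 < r.1 by omega]
              · simp_all [pvTC]
            · simp_all [pvTC]
          · simp_all [pvTC]
        · simp_all [pvTC]
    exact (PySem.List.foldl_congr_mem _ _ _ _ hbody).trans (PySem.List.foldl_append_if ..)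
  have hin2 : forall (p : Int × (Int × Int × Int)) (acc : List (Int × Int × Int)),
      (PySem.List.enumerate L).foldl (fun acc2 q =>
        if q.1 ≤ p.1 then acc2
        else (PySem.List.enumerate L).foldl (fun acc3 r =>
          if r.1 ≤ q.1 then acc3
          else if p.2.1 * q.2.1 + p.2.2.1 * q.2.2.1 + p.2.2.2 * q.2.2.2 ≠ 0 ∨
                  p.2.1 * r.2.1 + p.2.2.1 * r.2.2.1 + p.2.2.2 * r.2.2.2 ≠ 0 ∨
                  q.2.1 * r.2.1 + q.2.2.1 * r.2.2.1 + q.2.2.2 * r.2.2.2 ≠ 0 then acc3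
          else if S.contains (x + p.2.1, y + p.2.2.1, z + p.2.2.2) &&
                  S.contains (x + q.2.1, y + q.2.2.1, z + q.2.2.2) &&
                  S.contains (x + r.2.1, y + r.2.2.1, z + r.2.2.2) &&
                  S.contains (x + p.2.1 + q.2.1, y + p.2.2.1 + q.2.2.1, z + p.2.2.2 + q.2.2.2) &&
                  S.contains (x + p.2.1 + r.2.1, y + p.2.2.1 + r.2.2.1, z + p.2.2.2 + r.2.2.2) &&
                  S.contains (x + q.2.1 + r.2.1, y + q.2.2.1 + r.2.2.1, z + q.2.2.2 + r.2.2.2) &&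
                  S.contains (x + p.2.1 + q.2.1 + r.2.1, y + p.2.2.1 + q.2.2.1 + r.2.2.1,
                              z + p.2.2.2 + q.2.2.2 + r.2.2.2)
            then acc3 ++ [(p.1, q.1, r.1)] else acc3) acc2) acc
      = acc ++ ((PySem.List.enumerate L).flatMap (fun q =>
          if q.1 ≤ p.1 then []
          else ((PySem.List.enumerate L).filter (fun r =>
            decide (q.1 < r.1) && pvTC x y z S p.2 q.2 r.2)).map (fun r => (p.1, q.1, r.1)))) := by
    intro p acc
    have hbody : forall (acc2 : List (Int × Int × Int)) (q : Int × (Int × Int × Int)),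
        q ∈ PySem.List.enumerate L ->
        (if q.1 ≤ p.1 then acc2
         else (PySem.List.enumerate L).foldl (fun acc3 r =>
           if r.1 ≤ q.1 then acc3
           else if p.2.1 * q.2.1 + p.2.2.1 * q.2.2.1 + p.2.2.2 * q.2.2.2 ≠ 0 ∨
                   p.2.1 * r.2.1 + p.2.2.1 * r.2.2.1 + p.2.2.2 * r.2.2.2 ≠ 0 ∨
                   q.2.1 * r.2.1 + q.2.2.1 * r.2.2.1 + q.2.2.2 * r.2.2.2 ≠ 0 then acc3
           else if S.contains (x + p.2.1, y + p.2.2.1, z + p.2.2.2) &&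
                   S.contains (x + q.2.1, y + q.2.2.1, z + q.2.2.2) &&
                   S.contains (x + r.2.1, y + r.2.2.1, z + r.2.2.2) &&
                   S.contains (x + p.2.1 + q.2.1, y + p.2.2.1 + q.2.2.1, z + p.2.2.2 + q.2.2.2) &&
                   S.contains (x + p.2.1 + r.2.1, y + p.2.2.1 + r.2.2.1, z + p.2.2.2 + r.2.2.2) &&
                   S.contains (x + q.2.1 + r.2.1, y + q.2.2.1 + r.2.2.1, z + q.2.2.2 + r.2.2.2) &&
                   S.contains (x + p.2.1 + q.2.1 + r.2.1, y + p.2.2.1 + q.2.2.1 + r.2.2.1,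
                               z + p.2.2.2 + q.2.2.2 + r.2.2.2)
             then acc3 ++ [(p.1, q.1, r.1)] else acc3) acc2)
        = acc2 ++ (if q.1 ≤ p.1 then []
           else ((PySem.List.enumerate L).filter (fun r =>
             decide (q.1 < r.1) && pvTC x y z S p.2 q.2 r.2)).map (fun r => (p.1, q.1, r.1))) := by
      intro acc2 q _
      by_cases h1 : q.1 ≤ p.1
      · rw [if_pos h1, if_pos h1, List.append_nil]
      · rw [if_neg h1, if_neg h1, hin3 p q acc2]
    exact (PySem.List.foldl_congr_mem _ _ _ _ hbody).trans (PySem.List.foldl_append_eq_flatMap ..)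
  refine Eq.trans ((PySem.List.foldl_congr_mem _ _ _ _ (fun acc p _ => hin2 p acc)).trans
    (PySem.List.foldl_append_eq_flatMap ..)) ?_
  rw [List.nil_append,
    PySem.List.enumerate_eq_map_pyRange L ((0:Int),(0:Int),(0:Int)), List.flatMap_map]
  refine List.flatMap_congr (fun i hi => ?_)
  have hmi := (PySem.List.mem_pyRange_one).mp hi
  simp only [List.flatMap_map, List.filter_map, List.map_map, Function.comp_def]
  rw [pv_flatMap_range i (PySem.List.len L) (by omega) (by omega)]
  refine List.flatMap_congr (fun j hj => ?_)
  have hmj := (PySem.List.mem_pyRange_one).mp hj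
  rw [pv_filter_range j (PySem.List.len L) (by omega) (by omega)]

-- membership characterisation of B's edge list
theorem pv_mem_edgesB (x y z : Int) (S L : List (Int × Int × Int)) (a b : Int) :
    (a, b) ∈ pvEdgesB x y z S L ↔
      (0 ≤ a ∧ a < b ∧ b < PySem.List.len L ∧
        pvEC x y z S (PySem.List.pyGetD L a (0,0,0)) (PySem.List.pyGetD L b (0,0,0)) = true) := by
  rw [← pv_edges_eq, pvEdgesA_canon]
  simp only [List.mem_flatMap, List.mem_map, List.mem_filter, PySem.List.mem_pyRange_one,
    Prod.mk.injEq]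
  constructor
  · rintro ⟨i, hi, j, ⟨⟨hj1, hj2⟩, hec⟩, hia, hjb⟩
    subst hia; subst hjb
    exact ⟨hi.1, by omega, hj2, hec⟩
  · rintro ⟨ha, hab, hb, hec⟩
    exact ⟨a, ⟨ha, by omega⟩, b, ⟨⟨by omega, hb⟩, hec⟩, rfl, rfl⟩

-- the edge set built by B answers exactly the edge condition for index pairs in range
theorem pv_contains_edges (x y z : Int) (S L : List (Int × Int × Int)) (a b : Int)
    (ha : 0 ≤ a) (hab : a < b) (hb : b < PySem.List.len L) :
    PySem.Set.contains (PySem.Set.ofList (pvEdgesB x y z S L)) (a, b)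
      = pvEC x y z S (PySem.List.pyGetD L a (0,0,0)) (PySem.List.pyGetD L b (0,0,0)) := by
  rw [Bool.eq_iff_iff, PySem.Set.contains_iff, PySem.Set.mem_ofList, pv_mem_edgesB]
  constructor
  · rintro ⟨_, _, _, h⟩; exact h
  · intro h; exact ⟨ha, hab, hb, h⟩

-- every link vertex direction points to a site
theorem pv_vert_site (x y z : Int) (S L : List (Int × Int × Int))
    (hL : forall d, d ∈ L -> S.contains (x + d.1, y + d.2.1, z + d.2.2) = true)
    (i : Int) (hi : 0 ≤ i) (hilt : i < PySem.List.len L) :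
    S.contains (x + (PySem.List.pyGetD L i (0,0,0)).1, y + (PySem.List.pyGetD L i (0,0,0)).2.1,
      z + (PySem.List.pyGetD L i (0,0,0)).2.2) = true := by
  rw [PySem.List.len_eq] at hilt
  exact hL _ (PySem.List.pyGetD_mem L (0,0,0) ⟨by omega, by omega⟩)

-- A's triangles = B's triangles (given that every direction in L points to a site)
set_option maxHeartbeats 1000000 in
theorem pv_tris_eq (x y z : Int) (S L : List (Int × Int × Int))
    (hL : forall d, d ∈ L -> S.contains (x + d.1, y + d.2.1, z + d.2.2) = true) :
    pvTrisA x y z S L = pvTrisB x y z S L (pvEdgesB x y z S L) := by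
  rw [pvTrisA_canon]
  unfold pvTrisB
  dsimp only
  set ES := PySem.Set.ofList (pvEdgesB x y z S L) with hES
  conv_rhs => rw [show pvEdgesB x y z S L =
    (PySem.List.pyRange 0 (PySem.List.len L) 1).flatMap (fun i =>
      ((PySem.List.pyRange (i + 1) (PySem.List.len L) 1).filter (fun j =>
          pvEC x y z S (PySem.List.pyGetD L i (0,0,0)) (PySem.List.pyGetD L j (0,0,0)))).map
        (fun j => (i, j))) from by rw [← pv_edges_eq, pvEdgesA_canon]]
  rw [List.flatMap_assoc]
  refine List.flatMap_congr (fun i hi => ?_)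
  have hmi := (PySem.List.mem_pyRange_one).mp hi
  rw [List.flatMap_map]
  rw [pv_flatMap_filter (PySem.List.pyRange (i + 1) (PySem.List.len L) 1)
      (fun j => pvEC x y z S (PySem.List.pyGetD L i (0,0,0)) (PySem.List.pyGetD L j (0,0,0))) _ ?hnil]
  case hnil =>
    intro j hj hec
    simp only [List.map_eq_nil_iff, List.filter_eq_nil_iff]
    intro k hk
    simp only [pvEC, Bool.and_eq_false_iff] at hec
    rcases hec with h | h
    · simp [pvTC, h]
    · simp at h
      simp [pvTC, h]
  refine List.flatMap_congr (fun j hj => ?_)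
  have hj' := List.mem_filter.mp hj
  have hmj := (PySem.List.mem_pyRange_one).mp hj'.1
  have hec := hj'.2
  refine congrArg _ (List.filter_congr (fun k hk => ?_))
  have hmk := (PySem.List.mem_pyRange_one).mp hk
  rw [hES, pv_contains_edges x y z S L i k (by omega) (by omega) (by omega),
    pv_contains_edges x y z S L j k (by omega) (by omega) (by omega)]
  simp only [pvEC, Bool.and_eq_true] at hec
  have hv1 := pv_vert_site x y z S L hL i (by omega) (by omega)
  have hv2 := pv_vert_site x y z S L hL j (by omega) (by omega)
  have hv3 := pv_vert_site x y z S L hL k (by omega) (by omega)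
  simp only [pvTC, pvEC, hec.1, hec.2, hv1, hv2, hv3, Bool.true_and, Bool.and_true]
  generalize ((PySem.List.pyGetD L i (0,0,0)).1 * (PySem.List.pyGetD L k (0,0,0)).1 +
      (PySem.List.pyGetD L i (0,0,0)).2.1 * (PySem.List.pyGetD L k (0,0,0)).2.1 +
      (PySem.List.pyGetD L i (0,0,0)).2.2 * (PySem.List.pyGetD L k (0,0,0)).2.2 == 0) = o13
  generalize ((PySem.List.pyGetD L j (0,0,0)).1 * (PySem.List.pyGetD L k (0,0,0)).1 +
      (PySem.List.pyGetD L j (0,0,0)).2.1 * (PySem.List.pyGetD L k (0,0,0)).2.1 +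
      (PySem.List.pyGetD L j (0,0,0)).2.2 * (PySem.List.pyGetD L k (0,0,0)).2.2 == 0) = o23
  generalize (S.contains (x + (PySem.List.pyGetD L i (0,0,0)).1 + (PySem.List.pyGetD L k (0,0,0)).1,
      y + (PySem.List.pyGetD L i (0,0,0)).2.1 + (PySem.List.pyGetD L k (0,0,0)).2.1,
      z + (PySem.List.pyGetD L i (0,0,0)).2.2 + (PySem.List.pyGetD L k (0,0,0)).2.2)) = c13
  generalize (S.contains (x + (PySem.List.pyGetD L j (0,0,0)).1 + (PySem.List.pyGetD L k (0,0,0)).1,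
      y + (PySem.List.pyGetD L j (0,0,0)).2.1 + (PySem.List.pyGetD L k (0,0,0)).2.1,
      z + (PySem.List.pyGetD L j (0,0,0)).2.2 + (PySem.List.pyGetD L k (0,0,0)).2.2)) = c23
  generalize (S.contains (x + (PySem.List.pyGetD L i (0,0,0)).1 + (PySem.List.pyGetD L j (0,0,0)).1 +
      (PySem.List.pyGetD L k (0,0,0)).1,
      y + (PySem.List.pyGetD L i (0,0,0)).2.1 + (PySem.List.pyGetD L j (0,0,0)).2.1 +
      (PySem.List.pyGetD L k (0,0,0)).2.1,
      z + (PySem.List.pyGetD L i (0,0,0)).2.2 + (PySem.List.pyGetD L j (0,0,0)).2.2 +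
      (PySem.List.pyGetD L k (0,0,0)).2.2)) = c123
  cases o13 <;> cases o23 <;> cases c13 <;> cases c23 <;> cases c123 <;> rfl

-- ===== VERDICT (by name: the statement is the Claim_ definition above) =====
theorem cubical_vertex_link_spec : Claim_equal_cubical_vertex_link := by
  intro v S _
  unfold Spec_cubical_vertex_link cubical_vertex_link cubical_vertex_link_alt
  dsimp only
  rw [pv_verts_eq, pv_edges_eq, pv_tris_eq]
  intro d hd
  exact (List.mem_filter.mp hd).2
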